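-- pv_equiv track=rewrite | github.com/EmanuelGarciaR/four_in_a_row | app/model.py | check_potential_line
-- ===== SOURCE A (Python) =====
-- def check_potential_line(line, token):
--     count = 0
--     empty_count = 0
--     for cell in line:
--         if cell == token:
--             count += 1
--         elif cell == ' ':
--             empty_count += 1
--         else:
--             count = 0
--             empty_count = 0
--         if count + empty_count >= 4:
--             return True
--     return False
-- ===== SOURCE B (Python) =====
-- def check_potential_line(line, token):
--     return any(all(c == token or c == ' ' for c in line[i:i+4])
--                for i in range(len(line) - 3))
-- ===== Notes on version B (the rewrite author's own statement) =====
-- stated objective: alternative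
-- what changed: Replaced the streaming pair of run counters with a brute-force check of every length-4 window: slice line[i:i+4] for each start index and test whether all four cells are the token or blank.
import Mathlib
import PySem

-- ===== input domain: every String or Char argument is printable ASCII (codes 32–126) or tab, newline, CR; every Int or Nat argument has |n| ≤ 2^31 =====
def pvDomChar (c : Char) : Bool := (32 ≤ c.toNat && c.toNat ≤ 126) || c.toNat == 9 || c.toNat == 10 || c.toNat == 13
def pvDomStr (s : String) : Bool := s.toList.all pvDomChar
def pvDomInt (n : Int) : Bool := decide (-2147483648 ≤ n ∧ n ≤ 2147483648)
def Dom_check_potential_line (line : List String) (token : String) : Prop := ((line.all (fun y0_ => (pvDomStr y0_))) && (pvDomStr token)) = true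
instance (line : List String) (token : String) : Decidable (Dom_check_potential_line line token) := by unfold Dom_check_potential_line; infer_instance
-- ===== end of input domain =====

-- B replaces A's streaming run counters with a brute-force test of every length-4 window (alternative decomposition, same result).

-- ===== PORT A =====
-- literal port of A's loop: two Int counters, early return once count + empty_count >= 4
def pvLoopA (token : String) : List String → Int → Int → Bool
  | [], _, _ => false
  | cell :: rest, count, empty_count =>
    let p :=
      if cell == token then (count + 1, empty_count)
      else if cell == " " then (count, empty_count + 1)
      else ((0 : Int), (0 : Int))
    if 4 ≤ p.1 + p.2 then true else pvLoopA token rest p.1 p.2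

def check_potential_line (line : List String) (token : String) : Bool :=
  pvLoopA token line 0 0

-- ===== PORT B =====
-- Source B: any(all(c == token or c == ' ' for c in line[i:i+4]) for i in range(len(line) - 3))
-- range(len(line)-3) is empty when len < 4, matching Nat truncation in List.range.
def check_potential_line_alt (line : List String) (token : String) : Bool :=
  (List.range (line.length - 3)).any (fun i =>
    (PySem.List.slice line (some (i : Int)) (some ((i + 4 : Nat) : Int))).all
      (fun c => c == token || c == " "))

-- ===== PRECONDITION & SPEC =====
def Spec_check_potential_line (line : List String) (token : String) (out : Bool) : Prop := out = check_potential_line_alt line token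
instance (line : List String) (token : String) (out : Bool) : Decidable (Spec_check_potential_line line token out) := by unfold Spec_check_potential_line; infer_instance

-- ===== CLAIM (what is proved, stated in full; the proofs are below) =====
def Claim_equal_check_potential_line : Prop := ∀ (line : List String) (token : String), Dom_check_potential_line line token → Spec_check_potential_line line token (check_potential_line line token)

-- ===== LEMMAS AND PROOFS =====

def pvKey (token c : String) : Bool := c == token || c == " "

-- recursive "some window of 4 consecutive true's" predicate, bridge between the two ports
def pvW : List Bool → Bool
  | a :: b :: c :: d :: r => (a && b && c && d) || pvW (b :: c :: d :: r)
  | _ => false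

-- single Nat counter version of A's loop
def pvScanN (token : String) : List String → Nat → Bool
  | [], _ => false
  | c :: r, s =>
    let s' := if pvKey token c then s + 1 else 0
    if 4 ≤ s' then true else pvScanN token r s'

theorem pvLoopA_eq_scanN (token : String) (l : List String) :
    ∀ (count empty : Int), 0 ≤ count → 0 ≤ empty →
      pvLoopA token l count empty = pvScanN token l (count + empty).toNat := by
  induction l with
  | nil => intro c e _ _; rfl
  | cons cell rest ih =>
    intro c e hc he
    by_cases h1 : cell == token
    · simp only [pvLoopA, pvScanN, pvKey, h1, Bool.true_or, if_true]
      by_cases h4 : (4 : Int) ≤ c + 1 + e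
      · rw [if_pos h4, if_pos (show 4 ≤ (c + e).toNat + 1 from by omega)]
      · rw [if_neg h4, if_neg (show ¬ 4 ≤ (c + e).toNat + 1 from by omega),
            ih (c + 1) e (by omega) he,
            show (c + 1 + e).toNat = (c + e).toNat + 1 from by omega]
    · by_cases h2 : cell == " "
      · simp only [pvLoopA, pvScanN, pvKey, h1, h2, Bool.false_eq_true,
          Bool.or_true, if_false, if_true]
        by_cases h4 : (4 : Int) ≤ c + (e + 1)
        · rw [if_pos h4, if_pos (show 4 ≤ (c + e).toNat + 1 from by omega)]
        · rw [if_neg h4, if_neg (show ¬ 4 ≤ (c + e).toNat + 1 from by omega),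
              ih c (e + 1) hc (by omega),
              show (c + (e + 1)).toNat = (c + e).toNat + 1 from by omega]
      · simp only [pvLoopA, pvScanN, pvKey, h1, h2, Bool.false_eq_true, Bool.false_or, if_false]
        rw [if_neg (show ¬ (4 : Int) ≤ 0 + 0 from by omega), if_neg (show ¬ 4 ≤ 0 from by omega)]
        simpa using ih 0 0 le_rfl le_rfl

theorem pvW_short (l : List Bool) (h : l.length < 4) : pvW l = false := by
  rcases l with _ | ⟨a, _ | ⟨b, _ | ⟨c, _ | ⟨d, r⟩⟩⟩⟩ <;> simp [pvW] at *
  omega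

theorem pvW_cons_false (l : List Bool) : pvW (false :: l) = pvW l := by
  rcases l with _ | ⟨b, _ | ⟨c, _ | ⟨d, r⟩⟩⟩ <;> simp [pvW]

theorem pvW_drop1 (l : List Bool) : pvW (true :: false :: l) = pvW l := by
  rcases l with _ | ⟨c, _ | ⟨d, r⟩⟩ <;> simp [pvW, pvW_cons_false]

theorem pvW_drop2 (l : List Bool) : pvW (true :: true :: false :: l) = pvW l := by
  rcases l with _ | ⟨d, r⟩ <;> simp [pvW, pvW_drop1]

theorem pvW_drop3 (l : List Bool) : pvW (true :: true :: true :: false :: l) = pvW l := by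
  simp [pvW, pvW_drop2]

theorem pvScanN_eq_W (token : String) (l : List String) :
    ∀ (s : Nat), s < 4 →
      pvScanN token l s = pvW (List.replicate s true ++ l.map (pvKey token)) := by
  induction l with
  | nil =>
    intro s hs
    simp only [pvScanN, List.map_nil, List.append_nil]
    exact (pvW_short _ (by simpa using hs)).symm
  | cons c r ih =>
    intro s hs
    by_cases hk : pvKey token c
    · by_cases h4 : 4 ≤ s + 1
      · obtain rfl : s = 3 := by omega
        simp [pvScanN, hk, pvW, List.replicate]
      · simp only [pvScanN, hk, if_true, h4, if_false]
        rw [ih (s + 1) (by omega), List.replicate_succ']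
        simp [hk, List.append_assoc]
    · simp only [Bool.not_eq_true] at hk
      simp only [pvScanN, hk, Bool.false_eq_true, if_false,
        if_neg (show ¬ (4 ≤ 0) from by omega)]
      rw [ih 0 (by omega)]
      simp only [List.map_cons, hk]
      interval_cases s <;>
        simp [List.replicate, pvW_cons_false, pvW_drop1, pvW_drop2, pvW_drop3]

theorem pvSlice_window (xs : List String) (i : Nat) :
    PySem.List.slice xs (some (i : Int)) (some ((i + 4 : Nat) : Int)) = (xs.drop i).take 4 := by
  rw [PySem.List.slice_natCast]
  congr 1
  omega

theorem pvAlt_eq_W (token : String) (line : List String) :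
    check_potential_line_alt line token = pvW (line.map (pvKey token)) := by
  induction line with
  | nil => rfl
  | cons a t ih =>
    rcases t with _ | ⟨b, _ | ⟨c, _ | ⟨d, r⟩⟩⟩
    all_goals try { simp [check_potential_line_alt, pvW]; done }
    · unfold check_potential_line_alt at ih ⊢
      simp only [pvSlice_window] at ih ⊢
      have hlen : (a :: b :: c :: d :: r).length - 3 = ((b :: c :: d :: r).length - 3) + 1 := by
        simp
      rw [hlen, List.range_succ_eq_map, List.any_cons, List.any_map]
      have hfun :
          ((fun i => (((a :: b :: c :: d :: r).drop i).take 4).all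
              (fun c => c == token || c == " ")) ∘ (· + 1))
          = (fun i => (((b :: c :: d :: r).drop i).take 4).all
              (fun c => c == token || c == " ")) := by
        funext i
        simp [List.drop_succ_cons]
      rw [hfun, ih]
      simp [pvW, pvKey, List.map_cons, Bool.and_assoc]

-- ===== VERDICT (by name: the statement is the Claim_ definition above) =====
theorem check_potential_line_spec : Claim_equal_check_potential_line := by
  intro line token _
  show check_potential_line line token = check_potential_line_alt line token
  unfold check_potential_line
  rw [pvLoopA_eq_scanN token line 0 0 le_rfl le_rfl,
      show ((0 : Int) + 0).toNat = 0 from rfl,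
      pvScanN_eq_W token line 0 (by omega), pvAlt_eq_W]
  rfl
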